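-- pv_equiv track=rewrite | github.com/gimquokka/problem-solving | JinyounKim/Programers/Lv_1/모의고사_opt.py | solution
-- ===== SOURCE A (Python) =====
-- def solution(answers):
--     answer = []
--
--     pattern1 = [1, 2, 3, 4, 5]
--     pattern2 = [2, 1, 2, 3, 2, 4, 2, 5]
--     pattern3 = [3, 3, 1, 1, 2, 2, 4, 4, 5, 5]
--     score = [0]*3
--     for idx, ans in enumerate(answers):
--         if ans == pattern1[idx%5]:
--             score[0] += 1
--         if ans == pattern2[idx%8]:
--             score[1] += 1
--         if ans == pattern3[idx%10]:
--             score[2] += 1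
--
--     max_score = max(score)
--     for idx, s in enumerate(score):
--         if s == max_score:
--             answer.append(idx+1)
--
--     return answer
-- ===== SOURCE B (Python) =====
-- def solution(answers):
--     patterns = [[1, 2, 3, 4, 5],
--                 [2, 1, 2, 3, 2, 4, 2, 5],
--                 [3, 3, 1, 1, 2, 2, 4, 4, 5, 5]]
--     # Histogram over the 40-periodic residue classes (lcm of the pattern
--     # lengths): one pass builds hist[(i % 40, answer)], then each pattern's
--     # score is 40 dict lookups -- no per-answer pattern comparisons.
--     hist = {}
--     for i, a in enumerate(answers):
--         k = (i % 40, a)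
--         hist[k] = hist.get(k, 0) + 1
--     score = [sum(hist.get((r, p[r % len(p)]), 0) for r in range(40))
--              for p in patterns]
--     m = max(score)
--     return [j + 1 for j, s in enumerate(score) if s == m]
-- ===== Notes on version B (the rewrite author's own statement) =====
-- stated objective: alternative
-- what changed: B replaces A's per-answer comparisons against the three cyclic patterns by a histogram dict keyed by (index mod 40, answer) built in one pass (40 = lcm of the pattern lengths); each pattern's score is then obtained by 40 dict lookups, independent of the answers list.
import Mathlib
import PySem

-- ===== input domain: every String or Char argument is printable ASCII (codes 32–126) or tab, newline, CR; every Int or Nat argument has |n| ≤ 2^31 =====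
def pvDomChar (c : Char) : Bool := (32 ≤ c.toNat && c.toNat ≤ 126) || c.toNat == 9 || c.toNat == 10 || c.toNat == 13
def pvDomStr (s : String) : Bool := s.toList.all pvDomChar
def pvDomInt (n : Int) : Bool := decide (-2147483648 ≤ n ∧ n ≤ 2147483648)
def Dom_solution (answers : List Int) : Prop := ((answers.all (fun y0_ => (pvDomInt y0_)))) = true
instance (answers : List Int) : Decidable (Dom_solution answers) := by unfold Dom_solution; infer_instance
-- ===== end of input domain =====

-- B replaces A's per-answer pattern comparisons by a histogram dict keyed by
-- (index mod 40, answer); each pattern's score is then 40 dict lookups (alternative decomposition, same cost).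


-- ===== PORT A =====
def solution (answers : List Int) : List Int :=
  let pattern1 : List Int := [1, 2, 3, 4, 5]
  let pattern2 : List Int := [2, 1, 2, 3, 2, 4, 2, 5]
  let pattern3 : List Int := [3, 3, 1, 1, 2, 2, 4, 4, 5, 5]
  -- one pass over answers, three counters updated by three if-branches
  -- (pattern indices idx%5 / idx%8 / idx%10 are always in range, so pyGetD is exact)
  let score := (PySem.List.enumerate answers).foldl
    (fun (s : Int × Int × Int) (ia : Int × Int) =>
      let s0 := if ia.2 = PySem.List.pyGetD pattern1 (PySem.Int.mod ia.1 5) 0 then s.1 + 1 else s.1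
      let s1 := if ia.2 = PySem.List.pyGetD pattern2 (PySem.Int.mod ia.1 8) 0 then s.2.1 + 1 else s.2.1
      let s2 := if ia.2 = PySem.List.pyGetD pattern3 (PySem.Int.mod ia.1 10) 0 then s.2.2 + 1 else s.2.2
      (s0, s1, s2)) ((0 : Int), (0 : Int), (0 : Int))
  let scoreL : List Int := [score.1, score.2.1, score.2.2]
  let max_score := (PySem.List.max? scoreL (fun y => y)).getD 0   -- scoreL ≠ [], so max? never misses
  (PySem.List.enumerate scoreL).foldl
    (fun (acc : List Int) (p : Int × Int) => if p.2 = max_score then acc ++ [p.1 + 1] else acc) []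

-- ===== PORT B =====
-- hist[(i % 40, a)] = hist.get((i % 40, a), 0) + 1, built in one pass over enumerate(answers)
def buildHist (answers : List Int) : PySem.Dict (Int × Int) Int :=
  (PySem.List.enumerate answers).foldl
    (fun d ia =>
      let k : Int × Int := (PySem.Int.mod ia.1 40, ia.2)
      d.insert k (d.getD k 0 + 1)) PySem.Dict.empty

-- sum(hist.get((r, p[r % len(p)]), 0) for r in range(40))
def histScore (hist : PySem.Dict (Int × Int) Int) (p : List Int) : Int :=
  ((PySem.List.pyRange 0 40 1).map
    (fun r => hist.getD (r, PySem.List.pyGetD p (PySem.Int.mod r (p.length : Int)) 0) 0)).sum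

def solution_alt (answers : List Int) : List Int :=
  let patterns : List (List Int) :=
    [[1, 2, 3, 4, 5], [2, 1, 2, 3, 2, 4, 2, 5], [3, 3, 1, 1, 2, 2, 4, 4, 5, 5]]
  let hist := buildHist answers
  let score := patterns.map (fun p => histScore hist p)
  let m := (PySem.List.max? score (fun y => y)).getD 0   -- score ≠ [], so max? never misses
  ((PySem.List.enumerate score).filter (fun q => q.2 = m)).map (fun q => q.1 + 1)

-- ===== PRECONDITION & SPEC =====
def Spec_solution (answers : List Int) (out : List Int) : Prop := out = solution_alt answers
instance (answers : List Int) (out : List Int) : Decidable (Spec_solution answers out) := by unfold Spec_solution; infer_instance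

-- ===== CLAIM (what is proved, stated in full; the proofs are below) =====
def Claim_equal_solution : Prop := ∀ (answers : List Int), Dom_solution answers → Spec_solution answers (solution answers)

-- ===== LEMMAS AND PROOFS =====

-- A's single three-counter pass equals the three per-pattern countP's.
theorem fold_eq_counts (g1 g2 g3 : Int → Int) (l : List (Int × Int)) :
    ∀ (s0 s1 s2 : Int),
      l.foldl (fun (s : Int × Int × Int) (ia : Int × Int) =>
        (if ia.2 = g1 ia.1 then s.1 + 1 else s.1,
         if ia.2 = g2 ia.1 then s.2.1 + 1 else s.2.1,
         if ia.2 = g3 ia.1 then s.2.2 + 1 else s.2.2)) (s0, s1, s2)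
      = (s0 + (l.countP (fun ia => ia.2 = g1 ia.1) : Int),
         s1 + (l.countP (fun ia => ia.2 = g2 ia.1) : Int),
         s2 + (l.countP (fun ia => ia.2 = g3 ia.1) : Int)) := by
  induction l with
  | nil => intro s0 s1 s2; simp
  | cons hd tl ih =>
    intro s0 s1 s2
    simp only [List.foldl_cons, List.countP_cons, decide_eq_true_eq]
    rw [ih]
    split_ifs <;> simp_all [Prod.ext_iff] <;> omega

-- A's winner-collecting append loop is a filter-map.
theorem foldl_append_if_prop (m : Int) (l : List (Int × Int)) :
    ∀ (acc : List Int),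
      l.foldl (fun acc p => if p.2 = m then acc ++ [p.1 + 1] else acc) acc
      = acc ++ (l.filter (fun p => p.2 = m)).map (fun p => p.1 + 1) := by
  induction l with
  | nil => intro acc; simp
  | cons hd tl ih =>
    intro acc
    simp only [List.foldl_cons, List.filter_cons, decide_eq_true_eq]
    by_cases h : hd.2 = m <;> simp [h, ih]

-- The indicator of one pair x over the residue range: exactly one residue can hit x.
theorem sum_indicator (g : Int → Int) (x : Int × Int) (h0 : 0 ≤ x.1) (h40 : x.1 < 40) :
    ((PySem.List.pyRange 0 40 1).map
      (fun r => if ((r, g r) : Int × Int) = x then (1 : Int) else 0)).sum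
    = if x.2 = g x.1 then 1 else 0 := by
  obtain ⟨a, b⟩ := x
  simp only at h0 h40 ⊢
  rw [PySem.List.pyRange_one_append 0 a 40 h0 (by omega),
      PySem.List.pyRange_one_cons h40]
  simp only [List.map_append, List.map_cons, List.sum_append, List.sum_cons]
  have hz1 : ((PySem.List.pyRange 0 a 1).map
      (fun r => if ((r, g r) : Int × Int) = (a, b) then (1 : Int) else 0)).sum = 0 := by
    apply List.sum_eq_zero; intro y hy
    simp only [List.mem_map] at hy
    obtain ⟨r, hr, rfl⟩ := hy
    rw [PySem.List.mem_pyRange_one] at hr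
    have : ¬ ((r, g r) : Int × Int) = (a, b) := by
      intro he; have := congrArg Prod.fst he; simp at this; omega
    simp [this]
  have hz2 : ((PySem.List.pyRange (a + 1) 40 1).map
      (fun r => if ((r, g r) : Int × Int) = (a, b) then (1 : Int) else 0)).sum = 0 := by
    apply List.sum_eq_zero; intro y hy
    simp only [List.mem_map] at hy
    obtain ⟨r, hr, rfl⟩ := hy
    rw [PySem.List.mem_pyRange_one] at hr
    have : ¬ ((r, g r) : Int × Int) = (a, b) := by
      intro he; have := congrArg Prod.fst he; simp at this; omega
    simp [this]
  rw [hz1, hz2]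
  by_cases hb : b = g a
  · simp [hb]
  · have : ¬ ((a, g a) : Int × Int) = (a, b) := by
      intro he; have := congrArg Prod.snd he; simp at this; exact hb this.symm
    simp [this, hb]

-- Summing the histogram counts over the 40 residues counts all matches.
theorem sum_count_eq_countP (g : Int → Int) (l : List (Int × Int))
    (h : ∀ k ∈ l, 0 ≤ k.1 ∧ k.1 < 40) :
    ((PySem.List.pyRange 0 40 1).map (fun r => (l.count ((r, g r) : Int × Int) : Int))).sum
    = (l.countP (fun k => k.2 = g k.1) : Int) := by
  induction l with
  | nil => simp
  | cons x tl ih =>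
    have hx := h x (List.mem_cons_self)
    have htl : ∀ k ∈ tl, 0 ≤ k.1 ∧ k.1 < 40 := fun k hk => h k (List.mem_cons_of_mem _ hk)
    simp only [List.count_cons, List.countP_cons, decide_eq_true_eq]
    have : ∀ r : Int, ((tl.count ((r, g r) : Int × Int)
        + if x = ((r, g r) : Int × Int) then 1 else 0 : Nat) : Int)
        = (tl.count ((r, g r) : Int × Int) : Int) + (if ((r, g r) : Int × Int) = x then (1:Int) else 0) := by
      intro r
      split_ifs with h1 h2
      · push_cast; ring
      · exact absurd h1.symm h2
      · rename_i h3; exact absurd h3.symm h1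
      · push_cast; ring
    simp only [beq_iff_eq, this]
    rw [PySem.List.sum_map_add_int, ih htl, sum_indicator g x hx.1 hx.2]
    split_ifs with h1 <;> push_cast <;> ring

-- B's histogram is Counter of the (i % 40, a) key list.
theorem buildHist_eq_counter (answers : List Int) :
    buildHist answers
    = PySem.Dict.counter ((PySem.List.enumerate answers).map
        (fun ia => ((PySem.Int.mod ia.1 40, ia.2) : Int × Int))) := by
  rw [← PySem.Dict.foldl_insert_getD_add_one_eq_counter, List.foldl_map]
  rfl

-- Each pattern's histogram score equals A's match count, for pattern lengths dividing 40.
theorem histScore_eq (answers : List Int) (p : List Int) (hdvd : (p.length : Int) ∣ 40) :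
    histScore (buildHist answers) p
    = ((PySem.List.enumerate answers).countP
        (fun ia => ia.2 = PySem.List.pyGetD p (PySem.Int.mod ia.1 (p.length : Int)) 0) : Int) := by
  have hlen : p.length ≠ 0 := by
    intro h0; rw [h0] at hdvd; norm_num at hdvd
  have hLpos : (0 : Int) < (p.length : Int) := by
    exact_mod_cast Nat.pos_of_ne_zero hlen
  have hmodmod : ∀ i : Int,
      PySem.Int.mod (PySem.Int.mod i 40) (p.length : Int) = PySem.Int.mod i (p.length : Int) := by
    intro i
    rw [PySem.Int.mod_eq_emod_of_pos (by norm_num : (0:Int) < 40),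
        PySem.Int.mod_eq_emod_of_pos hLpos, PySem.Int.mod_eq_emod_of_pos hLpos]
    exact Int.emod_emod_of_dvd i hdvd
  unfold histScore
  rw [buildHist_eq_counter]
  simp only [PySem.Dict.getD_counter]
  rw [sum_count_eq_countP (fun r => PySem.List.pyGetD p (PySem.Int.mod r (p.length : Int)) 0)
      _ ?hbounds]
  · rw [List.countP_map]
    congr 1
    apply List.countP_congr
    intro ia _
    simp only [Function.comp, hmodmod]
  · intro k hk
    simp only [List.mem_map] at hk
    obtain ⟨ia, _, rfl⟩ := hk
    exact ⟨PySem.Int.mod_nonneg _ (by norm_num), PySem.Int.mod_lt _ (by norm_num)⟩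

-- ===== VERDICT (by name: the statement is the Claim_ definition above) =====
theorem solution_spec : Claim_equal_solution := by
  intro answers _
  unfold Spec_solution solution solution_alt
  simp only [List.map_cons, List.map_nil]
  rw [fold_eq_counts
      (fun i => PySem.List.pyGetD [1, 2, 3, 4, 5] (PySem.Int.mod i 5) 0)
      (fun i => PySem.List.pyGetD [2, 1, 2, 3, 2, 4, 2, 5] (PySem.Int.mod i 8) 0)
      (fun i => PySem.List.pyGetD [3, 3, 1, 1, 2, 2, 4, 4, 5, 5] (PySem.Int.mod i 10) 0)
      (PySem.List.enumerate answers)]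
  simp only [histScore_eq answers [1, 2, 3, 4, 5] (by norm_num),
      histScore_eq answers [2, 1, 2, 3, 2, 4, 2, 5] (by norm_num),
      histScore_eq answers [3, 3, 1, 1, 2, 2, 4, 4, 5, 5] (by norm_num)]
  rw [foldl_append_if_prop]
  simp [PySem.List.enumerate]
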